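-- pv_equiv track=rewrite | github.com/Mapet13/Studia | ćwiczenia 3/19.py | get_longest_correct_sumsequences
-- ===== SOURCE A (Python) =====
-- def get_longest_correct_sumsequences(tab):
--     n = len(tab)
--
--     best = 0
--
--     for i in range(n):
--         index_sum = i
--         elements_sum = tab[i]
--         if best == 0 and elements_sum == index_sum:
--                 best = 1
--         for j in range(i-1, -1, -1):
--             elements_sum += tab[j]
--             index_sum += j
--             if elements_sum == index_sum and (i - j + 1) > best:
--                 best = i - j + 1
--
--     return best
-- ===== SOURCE B (Python) =====
-- def get_longest_correct_sumsequences(tab):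
--     # One pass over prefix sums of tab[k]-k: a subarray tab[a..b-1] has element
--     # sum equal to index sum iff the prefix p is equal at a and b; keep the
--     # first index each prefix value was seen at and take the longest span.
--     first = {0: -1}
--     p = 0
--     best = 0
--     for k, x in enumerate(tab):
--         p += x - k
--         if p in first:
--             d = k - first[p]
--             if d > best:
--                 best = d
--         else:
--             first[p] = k
--     return best
-- ===== Notes on version B (the rewrite author's own statement) =====
-- stated objective: faster
-- what changed: Replaced A's quadratic scan over all subarray start/end pairs by a single pass over prefix sums of tab[k]-k with a first-occurrence hash map (longest zero-sum-subarray technique).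
import Mathlib
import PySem

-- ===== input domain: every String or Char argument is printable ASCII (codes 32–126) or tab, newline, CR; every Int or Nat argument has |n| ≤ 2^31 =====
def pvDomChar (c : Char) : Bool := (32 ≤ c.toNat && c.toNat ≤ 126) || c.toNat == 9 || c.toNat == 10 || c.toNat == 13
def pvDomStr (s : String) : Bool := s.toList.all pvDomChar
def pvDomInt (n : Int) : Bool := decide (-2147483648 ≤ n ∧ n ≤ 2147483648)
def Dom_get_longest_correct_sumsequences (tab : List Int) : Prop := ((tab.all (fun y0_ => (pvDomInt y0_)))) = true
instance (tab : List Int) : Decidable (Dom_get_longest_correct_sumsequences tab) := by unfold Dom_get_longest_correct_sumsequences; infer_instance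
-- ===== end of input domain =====

-- B replaces A's O(n^2) scan over all subarray start/end pairs by one pass over prefix
-- sums of tab[k]-k with a first-occurrence map (longest zero-sum subarray technique).

-- ===== PORT A =====
-- A's inner loop body (for j in range(i-1, -1, -1)); tab[j] is always in range, ported as pyGetD _ _ 0
def pvAInner (tab : List Int) (i : Int) (st : Int × Int × Int) (j : Int) : Int × Int × Int :=
  let elements_sum := st.1 + PySem.List.pyGetD tab j 0
  let index_sum := st.2.1 + j
  let best := if elements_sum = index_sum ∧ i - j + 1 > st.2.2 then i - j + 1 else st.2.2
  (elements_sum, index_sum, best)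

-- A's outer loop body (for i in range(n))
def pvAOuter (tab : List Int) (best : Int) (i : Int) : Int :=
  let index_sum : Int := i
  let elements_sum : Int := PySem.List.pyGetD tab i 0
  let best := if best = 0 ∧ elements_sum = index_sum then 1 else best
  ((PySem.List.pyRange (i - 1) (-1) (-1)).foldl (pvAInner tab i) (elements_sum, index_sum, best)).2.2

def get_longest_correct_sumsequences (tab : List Int) : Int :=
  let n : Int := PySem.List.len tab
  (PySem.List.pyRange 0 n 1).foldl (pvAOuter tab) 0

-- ===== PORT B =====
-- Source B's loop body (for k, x in enumerate(tab)); state = (first, p, best)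
def pvBStep (st : PySem.Dict Int Int × Int × Int) (kx : Int × Int) :
    PySem.Dict Int Int × Int × Int :=
  let p := st.2.1 + kx.2 - kx.1
  match st.1.get? p with
  | some f =>
      let d := kx.1 - f
      (st.1, p, if d > st.2.2 then d else st.2.2)
  | none => (st.1.insert p kx.1, p, st.2.2)

def get_longest_correct_sumsequences_alt (tab : List Int) : Int :=
  ((PySem.List.enumerate tab 0).foldl pvBStep
    ((PySem.Dict.empty).insert 0 (-1), 0, 0)).2.2

-- ===== PRECONDITION & SPEC =====
def Spec_get_longest_correct_sumsequences (tab : List Int) (out : Int) : Prop := out = get_longest_correct_sumsequences_alt tab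
instance (tab : List Int) (out : Int) : Decidable (Spec_get_longest_correct_sumsequences tab out) := by unfold Spec_get_longest_correct_sumsequences; infer_instance

-- ===== CLAIM (what is proved, stated in full; the proofs are below) =====
def Claim_equal_get_longest_correct_sumsequences : Prop := ∀ (tab : List Int), Dom_get_longest_correct_sumsequences tab → Spec_get_longest_correct_sumsequences tab (get_longest_correct_sumsequences tab)

-- ===== LEMMAS AND PROOFS =====

-- prefix sums of tab[k] - k
def pvPref (tab : List Int) : Nat → Int
  | 0 => 0
  | k + 1 => pvPref tab k + (tab.getD k 0 - k)

-- candidate length of the subarray tab[a .. b-1] (0 if its element sum ≠ its index sum)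
def pvCand (tab : List Int) (b a : Nat) : Int :=
  if pvPref tab a = pvPref tab b then (b : Int) - (a : Int) else 0

-- best candidate ending at position i (subarrays tab[j..i], 0 ≤ j ≤ i)
def pvD (tab : List Int) (i : Nat) : Int :=
  ((List.range (i + 1)).map (fun j => pvCand tab (i + 1) j)).foldr max 0

-- best over the first m ends
def pvBm (tab : List Int) (m : Nat) : Int :=
  ((List.range m).map (pvD tab)).foldr max 0

lemma pvFoldrMaxPull (c e : Int) (A : List Int) :
    A.foldr max (max c e) = max c (A.foldr max e) := by
  induction A with
  | nil => rfl
  | cons x xs ih => simp [List.foldr_cons, ih, max_left_comm]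

lemma pvFoldrMaxNonneg (A : List Int) (e : Int) (he : 0 ≤ e) : 0 ≤ A.foldr max e := by
  induction A with
  | nil => exact he
  | cons x xs ih => exact le_trans ih (le_max_right _ _)

lemma pvLeFoldrMax (A : List Int) (e x : Int) (hx : x ∈ A) : x ≤ A.foldr max e := by
  induction A with
  | nil => cases hx
  | cons y ys ih =>
    rcases List.mem_cons.mp hx with h | h
    · subst h; exact le_max_left _ _
    · exact le_trans (ih h) (le_max_right _ _)

lemma pvFoldrMaxLe (A : List Int) (e v : Int) (he : e ≤ v) (h : ∀ x ∈ A, x ≤ v) :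
    A.foldr max e ≤ v := by
  induction A with
  | nil => exact he
  | cons x xs ih =>
    exact max_le (h x List.mem_cons_self) (ih (fun y hy => h y (List.mem_cons_of_mem _ hy)))

lemma pvFoldrMaxSnoc (f : Nat → Int) (m : Nat) :
    ((List.range (m + 1)).map f).foldr max 0 =
      max (f m) (((List.range m).map f).foldr max 0) := by
  rw [List.range_succ, List.map_append]
  simp only [List.map_cons, List.map_nil, List.foldr_append, List.foldr_cons, List.foldr_nil]
  exact pvFoldrMaxPull (f m) 0 _

lemma pvBm_succ (tab : List Int) (m : Nat) :
    pvBm tab (m + 1) = max (pvD tab m) (pvBm tab m) := pvFoldrMaxSnoc _ m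

lemma pvD_nonneg (tab : List Int) (i : Nat) : 0 ≤ pvD tab i :=
  pvFoldrMaxNonneg _ _ le_rfl

lemma pvBm_nonneg (tab : List Int) (m : Nat) : 0 ≤ pvBm tab m :=
  pvFoldrMaxNonneg _ _ le_rfl

lemma pvPref_succ (tab : List Int) (k : Nat) :
    pvPref tab (k + 1) = pvPref tab k + (tab.getD k 0 - k) := rfl

-- pvD in terms of the FIRST index at which the current prefix value occurred
lemma pvD_of_find?_some (tab : List Int) (m a0 : Nat)
    (h : (List.range (m + 1)).find? (fun a => pvPref tab a == pvPref tab (m + 1)) = some a0) :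
    pvD tab m = (m : Int) + 1 - (a0 : Int) := by
  have hmem' : a0 ∈ List.range (m + 1) := List.mem_of_find?_eq_some h
  have ha0 : pvPref tab a0 = pvPref tab (m + 1) := by
    have := List.find?_some h; simpa using this
  have ha0le : a0 ≤ m := Nat.lt_succ_iff.mp (List.mem_range.mp hmem')
  have hmin : ∀ b, b < a0 → pvPref tab b ≠ pvPref tab (m + 1) := by
    intro b hb
    obtain ⟨-, i, hi, hgi, hprior⟩ := List.find?_eq_some_iff_getElem.mp h
    have hia : (List.range (m + 1))[i] = i := List.getElem_range _
    have hb' := hprior b (by omega)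
    simp only [List.getElem_range] at hb'
    simpa using hb'
  unfold pvD
  apply le_antisymm
  · apply pvFoldrMaxLe
    · omega
    · intro x hx
      simp only [List.mem_map, List.mem_range] at hx
      obtain ⟨j, hj, rfl⟩ := hx
      unfold pvCand
      split_ifs with hjeq
      · have : ¬ j < a0 := fun hlt => hmin j hlt hjeq
        push_cast; omega
      · omega
  · have hc : pvCand tab (m + 1) a0 = (m : Int) + 1 - a0 := by
      unfold pvCand; rw [if_pos ha0]; push_cast; ring
    rw [← hc]
    exact pvLeFoldrMax _ _ _ (List.mem_map.mpr ⟨a0, List.mem_range.mpr (by omega), rfl⟩)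

lemma pvD_of_find?_none (tab : List Int) (m : Nat)
    (h : (List.range (m + 1)).find? (fun a => pvPref tab a == pvPref tab (m + 1)) = none) :
    pvD tab m = 0 := by
  unfold pvD
  apply le_antisymm
  · apply pvFoldrMaxLe _ _ _ le_rfl
    intro x hx
    simp only [List.mem_map, List.mem_range] at hx
    obtain ⟨j, hj, rfl⟩ := hx
    unfold pvCand
    split_ifs with hjeq
    · exact absurd hjeq (by simpa using List.find?_eq_none.mp h j (List.mem_range.mpr hj))
    · exact le_refl 0
  · exact pvD_nonneg tab m

-- range(i-1, -1, -1) is [i-1, …, 0]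
lemma pvPyRangeDown (m : Nat) :
    PySem.List.pyRange (m : Int) (-1) (-1) =
      ((List.range (m + 1)).reverse).map (fun k : Nat => (k : Int)) := by
  calc PySem.List.pyRange (m : Int) (-1) (-1)
      = (List.range (m + 1)).map (fun k : Nat => (m : Int) - (k : Int)) := by
        simp [PySem.List.pyRange, sub_eq_add_neg]
        rw [if_pos (show (-1 : Int) < (m : Int) by omega)]
    _ = ((List.range (m + 1)).reverse).map (fun k : Nat => (k : Int)) := by
        have hrev : (List.range (m + 1)).reverse
            = List.map (fun i => m - i) (List.range (m + 1)) := by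
          rw [List.range_eq_range', List.reverse_range', ← List.range_eq_range']
          apply List.map_congr_left
          intro k hk
          omega
        rw [hrev, List.map_map]
        apply List.map_congr_left
        intro k hk
        have hk' := List.mem_range.mp hk
        simp only [Function.comp_apply]
        omega

lemma pvCand_nonneg (tab : List Int) (b a : Nat) (h : a ≤ b) : 0 ≤ pvCand tab b a := by
  unfold pvCand
  split_ifs with h1
  · push_cast; omega
  · omega

-- ===== A-side lemmas =====
-- one comparison step of A equals taking a max with the candidate
lemma pvStepMax (tab : List Int) (i j : Nat) (b es isum : Int) (hb : 0 ≤ b)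
    (hei : es - isum = pvPref tab (i + 1) - pvPref tab j) :
    (if es = isum ∧ (i : Int) - (j : Int) + 1 > b then (i : Int) - (j : Int) + 1 else b)
      = max b (pvCand tab (i + 1) j) := by
  have hiff : es = isum ↔ pvPref tab j = pvPref tab (i + 1) := by
    constructor <;> intro h <;> omega
  unfold pvCand
  rcases em (pvPref tab j = pvPref tab (i + 1)) with heq | hne
  · rw [if_pos heq]
    by_cases h2 : (i : Int) - (j : Int) + 1 > b
    · rw [if_pos ⟨hiff.mpr heq, h2⟩]; push_cast; omega
    · rw [if_neg (by tauto)]; push_cast at h2 ⊢; omega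
  · rw [if_neg hne, if_neg (by tauto)]; omega

lemma pvAInner_eq (tab : List Int) (i : Int) (es isum b : Int) (j : Nat) :
    pvAInner tab i (es, isum, b) (j : Int) =
      (es + tab.getD j 0, isum + j,
        if es + tab.getD j 0 = isum + j ∧ i - j + 1 > b then i - j + 1 else b) := by
  simp [pvAInner]

lemma pvInnerAux (tab : List Int) (i : Nat) :
    ∀ (m : Nat) (es isum b : Int),
      es - isum = pvPref tab (i + 1) - pvPref tab (m + 1) → 0 ≤ b →
      ((((List.range (m + 1)).reverse).map (fun k : Nat => (k : Int))).foldl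
          (pvAInner tab (i : Int)) (es, isum, b)).2.2
        = max b (((List.range (m + 1)).map (fun j => pvCand tab (i + 1) j)).foldr max 0) := by
  intro m
  induction m with
  | zero =>
    intro es isum b h hb
    rw [List.range_one]
    simp only [List.reverse_cons, List.reverse_nil, List.nil_append, List.map_cons,
      List.map_nil, List.foldl_cons, List.foldl_nil, List.foldr_cons, List.foldr_nil,
      Nat.cast_zero]
    have h0 : (es + tab.getD 0 0) - (isum + ((0 : Nat) : Int))
        = pvPref tab (i + 1) - pvPref tab 0 := by
      rw [pvPref_succ] at h
      simp only [pvPref] at *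
      push_cast at *
      omega
    have hstep := pvStepMax tab i 0 b (es + tab.getD 0 0) (isum + ((0 : Nat) : Int)) hb h0
    have hA := pvAInner_eq tab (i : Int) es isum b 0
    simp only [Nat.cast_zero] at hA hstep
    rw [hA, hstep]
    have hc0 : 0 ≤ pvCand tab (i + 1) 0 := pvCand_nonneg tab (i + 1) 0 (by omega)
    rw [max_eq_left hc0]
  | succ m ih =>
    intro es isum b h hb
    have hsplit : (List.range (m + 1 + 1)).reverse = (m + 1) :: (List.range (m + 1)).reverse := by
      rw [List.range_succ, List.reverse_append]
      rfl
    rw [hsplit]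
    simp only [List.map_cons, List.foldl_cons]
    have h1 : (es + tab.getD (m + 1) 0) - (isum + ((m + 1 : Nat) : Int))
        = pvPref tab (i + 1) - pvPref tab (m + 1) := by
      rw [pvPref_succ tab (m + 1)] at h
      push_cast at h ⊢
      omega
    have hstep := pvStepMax tab i (m + 1) b (es + tab.getD (m + 1) 0)
      (isum + ((m + 1 : Nat) : Int)) hb
      (by rw [pvPref_succ tab (m + 1)] at h; push_cast at h ⊢; omega)
    rw [pvAInner_eq tab (i : Int) es isum b (m + 1), hstep]
    rw [ih (es + tab.getD (m + 1) 0) (isum + ((m + 1 : Nat) : Int))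
      (max b (pvCand tab (i + 1) (m + 1))) h1 (le_trans hb (le_max_left _ _))]
    rw [pvFoldrMaxSnoc (fun j => pvCand tab (i + 1) j) (m + 1)]
    rw [max_assoc]

-- the "best == 0" single-element special case of A is a max with the length-1 candidate
lemma pvQuirk (tab : List Int) (i : Nat) (b : Int) (hb : 0 ≤ b) :
    (if b = 0 ∧ tab.getD i 0 = (i : Int) then 1 else b) = max b (pvCand tab (i + 1) i) := by
  have hcand : pvCand tab (i + 1) i = if tab.getD i 0 = (i : Int) then 1 else 0 := by
    unfold pvCand
    rw [pvPref_succ]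
    have hiff : pvPref tab i = pvPref tab i + (tab.getD i 0 - (i : Int))
        ↔ tab.getD i 0 = (i : Int) := by
      constructor <;> intro h <;> omega
    split_ifs with h1 h2 h2
    · push_cast; omega
    · exact absurd (hiff.mp h1) h2
    · exact absurd (hiff.mpr h2) h1
    · rfl
  rw [hcand]
  split_ifs with h1 h2 h2 <;> omega

lemma pvOuterStep (tab : List Int) (i : Nat) (b : Int) (hb : 0 ≤ b) :
    pvAOuter tab b (i : Int) = max b (pvD tab i) := by
  simp only [pvAOuter, PySem.List.pyGetD_natCast]
  cases i with
  | zero =>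
    have hr : PySem.List.pyRange ((0 : Int) - 1) (-1) (-1) = [] := by decide
    simp only [Nat.cast_zero] at hr ⊢
    rw [hr, List.foldl_nil]
    have hq := pvQuirk tab 0 b hb
    simp only [Nat.cast_zero] at hq
    rw [hq]
    have hD : pvD tab 0 = pvCand tab 1 0 := by
      unfold pvD
      rw [List.range_one]
      simp only [List.map_cons, List.map_nil, List.foldr_cons, List.foldr_nil]
      exact max_eq_left (pvCand_nonneg tab 1 0 (by omega))
    rw [hD]
  | succ m =>
    have hcast : ((m + 1 : Nat) : Int) - 1 = (m : Int) := by push_cast; ring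
    rw [hcast, pvPyRangeDown m]
    have hq := pvQuirk tab (m + 1) b hb
    rw [hq]
    rw [pvInnerAux tab (m + 1) m (tab.getD (m + 1) 0) ((m + 1 : Nat) : Int)
      (max b (pvCand tab (m + 1 + 1) (m + 1)))
      (by rw [pvPref_succ tab (m + 1)]; push_cast; ring)
      (le_trans hb (le_max_left _ _))]
    rw [max_assoc, ← pvFoldrMaxSnoc (fun j => pvCand tab (m + 1 + 1) j) (m + 1)]
    rfl

lemma pvFoldOuter (tab : List Int) :
    ∀ (l : List Nat) (e : Int), 0 ≤ e →
      (l.map (fun k : Nat => (k : Int))).foldl (pvAOuter tab) e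
        = (l.map (pvD tab)).foldr max e := by
  intro l
  induction l with
  | nil => intro e _; rfl
  | cons k l ih =>
    intro e he
    rw [List.map_cons, List.foldl_cons, List.map_cons, List.foldr_cons,
      pvOuterStep tab k e he, ih _ (le_trans he (le_max_left _ _)),
      max_comm e (pvD tab k), pvFoldrMaxPull]

lemma pvLA (tab : List Int) : get_longest_correct_sumsequences tab = pvBm tab tab.length := by
  show (PySem.List.pyRange 0 (PySem.List.len tab) 1).foldl (pvAOuter tab) 0
      = pvBm tab tab.length
  rw [PySem.List.len_eq]
  have hrange : PySem.List.pyRange 0 (tab.length : Int) 1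
      = (List.range tab.length).map (fun k : Nat => (k : Int)) := by
    rw [PySem.List.pyRange_one]
    have hlen : ((tab.length : Int) - 0).toNat = tab.length := by omega
    rw [hlen]
    apply List.map_congr_left
    intro k hk
    omega
  rw [hrange, pvFoldOuter tab (List.range tab.length) 0 le_rfl]
  rfl

-- ===== B-side lemmas =====
lemma pvBStep_some (dict : PySem.Dict Int Int) (p0 b : Int) (kx : Int × Int) (f : Int)
    (h : dict.get? (p0 + kx.2 - kx.1) = some f) :
    pvBStep (dict, p0, b) kx =
      (dict, p0 + kx.2 - kx.1, if kx.1 - f > b then kx.1 - f else b) := by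
  simp [pvBStep, h]

lemma pvBStep_none (dict : PySem.Dict Int Int) (p0 b : Int) (kx : Int × Int)
    (h : dict.get? (p0 + kx.2 - kx.1) = none) :
    pvBStep (dict, p0, b) kx = (dict.insert (p0 + kx.2 - kx.1) kx.1, p0 + kx.2 - kx.1, b) := by
  simp [pvBStep, h]

lemma pvFindSingleton_none (tab : List Int) (m : Nat) (v : Int)
    (hv : pvPref tab (m + 1) ≠ v) :
    List.find? (fun a => pvPref tab a == v) [m + 1] = none :=
  List.find?_eq_none.mpr (fun x hx => by
    have hx' := List.mem_singleton.mp hx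
    subst hx'
    simp [hv])

lemma pvFindSingleton_some (tab : List Int) (m : Nat) (v : Int)
    (hv : pvPref tab (m + 1) = v) :
    List.find? (fun a => pvPref tab a == v) [m + 1] = some (m + 1) := by
  have hb : (pvPref tab (m + 1) == v) = true := beq_iff_eq.mpr hv
  simp [List.find?_cons, hb]

lemma pvBAux (tab : List Int) :
    ∀ (suf : List Int) (m : Nat) (dict : PySem.Dict Int Int),
      suf = tab.drop m →
      (∀ v : Int, dict.get? v =
        ((List.range (m + 1)).find? (fun a => pvPref tab a == v)).map (fun a => (a : Int) - 1)) →
      ((PySem.List.enumerate suf (m : Int)).foldl pvBStep (dict, pvPref tab m, pvBm tab m)).2.2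
        = pvBm tab (m + suf.length) := by
  intro suf
  induction suf with
  | nil => intro m dict _ _; simp [PySem.List.enumerate_nil]
  | cons x rest ih =>
    intro m dict hsuf hdict
    have hm : tab[m]? = some x := by
      rw [← List.head?_drop, ← hsuf]; rfl
    have hx : tab.getD m 0 = x := by
      rw [List.getD_eq_getElem?_getD, hm]; rfl
    have hrest : rest = tab.drop (m + 1) := by
      have := congrArg List.tail hsuf
      simpa [List.tail_drop] using this
    rw [PySem.List.enumerate_cons]
    simp only [List.foldl_cons]
    have hp' : pvPref tab m + x - (m : Int) = pvPref tab (m + 1) := by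
      rw [pvPref_succ, hx]; ring
    have hlen : m + (x :: rest).length = (m + 1) + rest.length := by
      simp [List.length_cons]; omega
    have hcast : (m : Int) + 1 = ((m + 1 : Nat) : Int) := by push_cast; ring
    cases hfind : (List.range (m + 1)).find? (fun a => pvPref tab a == pvPref tab (m + 1)) with
    | some a0 =>
      have hget : dict.get? (pvPref tab m + x - (m : Int)) = some ((a0 : Int) - 1) := by
        rw [hp', hdict, hfind]; rfl
      rw [pvBStep_some dict _ _ ((m : Int), x) _ hget]
      have hd : (m : Int) - ((a0 : Int) - 1) = pvD tab m := by
        rw [pvD_of_find?_some tab m a0 hfind]; ring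
      have hbest : (if (m : Int) - ((a0 : Int) - 1) > pvBm tab m then (m : Int) - ((a0 : Int) - 1)
          else pvBm tab m) = pvBm tab (m + 1) := by
        rw [hd, pvBm_succ]
        have h1 := pvBm_nonneg tab m
        have h2 := pvD_nonneg tab m
        split_ifs <;> omega
      rw [hp', hbest]
      have hdict' : ∀ v : Int, dict.get? v =
          ((List.range (m + 1 + 1)).find? (fun a => pvPref tab a == v)).map
            (fun a => (a : Int) - 1) := by
        intro v
        rw [List.range_succ (n := m + 1), List.find?_append]
        by_cases hv : pvPref tab (m + 1) = v
        · subst hv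
          rw [hfind, hdict, hfind]
          rfl
        · rw [pvFindSingleton_none tab m v hv, Option.or_none, hdict]
      rw [hcast, ih (m + 1) dict hrest hdict', hlen]
    | none =>
      have hget : dict.get? (pvPref tab m + x - (m : Int)) = none := by
        rw [hp', hdict, hfind]; rfl
      rw [pvBStep_none dict _ _ ((m : Int), x) hget]
      have hbm : pvBm tab m = pvBm tab (m + 1) := by
        rw [pvBm_succ, pvD_of_find?_none tab m hfind]
        have := pvBm_nonneg tab m
        omega
      have hdict'' : ∀ v : Int,
          (dict.insert (pvPref tab (m + 1)) (m : Int)).get? v =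
          ((List.range (m + 1 + 1)).find? (fun a => pvPref tab a == v)).map
            (fun a => (a : Int) - 1) := by
        intro v
        rw [List.range_succ (n := m + 1), List.find?_append]
        by_cases hv : v = pvPref tab (m + 1)
        · subst hv
          rw [PySem.Dict.get?_insert_self, hfind, pvFindSingleton_some tab m _ rfl]
          show some ((m : Int)) = some (((m + 1 : Nat) : Int) - 1)
          congr 1
          push_cast
          ring
        · rw [PySem.Dict.get?_insert_of_ne dict _ hv, hdict,
            pvFindSingleton_none tab m v (fun h => hv h.symm), Option.or_none]
      rw [hp', hbm, hcast, ih (m + 1) (dict.insert (pvPref tab (m + 1)) (m : Int)) hrest hdict'',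
        hlen]

lemma pvLB (tab : List Int) :
    get_longest_correct_sumsequences_alt tab = pvBm tab tab.length := by
  show ((PySem.List.enumerate tab 0).foldl pvBStep
      ((PySem.Dict.empty).insert 0 (-1), 0, 0)).2.2 = pvBm tab tab.length
  have hinit : ∀ v : Int, ((PySem.Dict.empty (κ := Int) (ν := Int)).insert 0 (-1)).get? v =
      ((List.range 1).find? (fun a => pvPref tab a == v)).map (fun a => (a : Int) - 1) := by
    intro v
    have h0 : pvPref tab 0 = 0 := rfl
    by_cases hv : v = 0
    · subst hv
      rw [PySem.Dict.get?_insert_self]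
      have : List.find? (fun a => pvPref tab a == (0 : Int)) [0] = some 0 := by
        simp [List.find?_cons, h0]
      rw [List.range_one, this]
      rfl
    · rw [PySem.Dict.get?_insert_of_ne _ _ hv, PySem.Dict.get?_empty, List.range_one]
      have : List.find? (fun a => pvPref tab a == v) [0] = none := by
        have hb : (pvPref tab 0 == v) = false := by
          rw [h0]
          exact beq_eq_false_iff_ne.mpr (fun h => hv h.symm)
        simp [List.find?_cons, hb]
      rw [this]
      rfl
  have hmain := pvBAux tab tab 0 ((PySem.Dict.empty).insert 0 (-1)) (by simp) hinit
  have h1 : pvPref tab 0 = 0 := rfl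
  have h2 : pvBm tab 0 = 0 := rfl
  rw [h1, h2] at hmain
  simpa using hmain

-- ===== VERDICT (by name: the statement is the Claim_ definition above) =====
theorem get_longest_correct_sumsequences_spec : Claim_equal_get_longest_correct_sumsequences := by
  intro tab _
  unfold Spec_get_longest_correct_sumsequences
  rw [pvLA, pvLB]
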